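-- pv_equiv track=rewrite | github.com/AgentRatz/IPL_LOYALTY_INDEX | visualization.py | consolidate_team_periods
-- ===== SOURCE A (Python) =====
-- def consolidate_team_periods(team_years):
--     """ Consolidate consecutive years for the same team into periods. """
--     consolidated = {}
--     for team, years in team_years.items():
--         years.sort()
--         periods = []
--         start_year = years[0]
--         end_year = years[0]
--
--         for i in range(1, len(years)):
--             if years[i] == end_year + 1:
--                 end_year = years[i]
--             else:
--                 periods.append((start_year, end_year))
--                 start_year = years[i]
--                 end_year = years[i]
--
--         periods.append((start_year, end_year))
--         consolidated[team] = periods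
--     return consolidated
-- ===== SOURCE B (Python) =====
-- def consolidate_team_periods(team_years):
--     """ Consolidate consecutive years for the same team into periods. """
--     consolidated = {}
--     for team, years in team_years.items():
--         years.sort()
--         breaks = [i for i in range(1, len(years)) if years[i] != years[i - 1] + 1]
--         bounds = [0] + breaks + [len(years)]
--         consolidated[team] = [(years[a], years[b - 1]) for a, b in zip(bounds, bounds[1:])]
--     return consolidated
-- ===== Notes on version B (the rewrite author's own statement) =====
-- stated objective: alternative
-- what changed: A's running (periods, start_year, end_year) state machine is replaced by computing the list of break positions (indices i with years[i] != years[i-1]+1), forming the bound list [0]+breaks+[len], and reading each period directly off adjacent bound pairs as (years[a], years[b-1]).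
-- outside the precondition, e.g. on consolidate_team_periods({'CSK': []}): A raises IndexError, B raises IndexError
import Mathlib
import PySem

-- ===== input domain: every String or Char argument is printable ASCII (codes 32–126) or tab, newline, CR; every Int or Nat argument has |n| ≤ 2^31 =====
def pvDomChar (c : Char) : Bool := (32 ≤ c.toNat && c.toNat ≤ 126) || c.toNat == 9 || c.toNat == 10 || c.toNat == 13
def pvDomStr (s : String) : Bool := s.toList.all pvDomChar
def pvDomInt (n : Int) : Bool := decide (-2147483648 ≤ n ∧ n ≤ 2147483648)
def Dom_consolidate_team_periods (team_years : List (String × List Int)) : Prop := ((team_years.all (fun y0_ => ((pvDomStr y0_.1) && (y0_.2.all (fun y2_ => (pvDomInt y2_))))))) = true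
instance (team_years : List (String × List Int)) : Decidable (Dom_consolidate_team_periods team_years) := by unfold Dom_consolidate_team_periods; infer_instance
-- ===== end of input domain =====

-- B replaces A's running start/end state machine by computing the break positions and reading the
-- period endpoints off the bound pairs (objective: idiomatic/alternative, same cost). Both programs
-- sort each years list in place; the equivalence proved is about the return value (the mutation is
-- identical in A and B).

-- ===== PORT A =====
-- A's per-team loop body on the (already sorted) years list: the running (periods, start, end)
-- state machine over `for i in range(1, len(years))`, then the final `periods.append(...)`.
def pvAper (years : List Int) : List (Int × Int) :=
  let start0 := PySem.List.pyGetD years 0 0   -- years[0]; IndexError when the list has no elements (excluded by Pre_)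
  let st := (PySem.List.pyRange 1 (years.length : Int) 1).foldl
    (fun (s : List (Int × Int) × Int × Int) i =>
      let yi := PySem.List.pyGetD years i 0
      if yi = s.2.2 + 1 then (s.1, s.2.1, yi)
      else (s.1 ++ [(s.2.1, s.2.2)], yi, yi))
    ([], start0, start0)
  st.1 ++ [(st.2.1, st.2.2)]

def consolidate_team_periods (team_years : List (String × List Int)) : List (String × List (Int × Int)) :=
  team_years.foldl
    (fun consolidated tv =>
      consolidated ++ [(tv.1, pvAper (PySem.List.sorted tv.2 (fun y => y) false))])
    []

-- ===== PORT B =====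
-- B's per-team body: `breaks = [i for i in range(1, len(years)) if years[i] != years[i-1] + 1]`
def pvBreaks (years : List Int) : List Int :=
  (PySem.List.pyRange 1 ((years.length : Int)) 1).filter
    (fun i => decide (PySem.List.pyGetD years i 0 ≠ PySem.List.pyGetD years (i - 1) 0 + 1))
-- `bounds = [0] + breaks + [len(years)]`, then `[(years[a], years[b-1]) for a, b in zip(bounds, bounds[1:])]`
def pvBper (years : List Int) : List (Int × Int) :=
  let bounds := 0 :: (pvBreaks years ++ [(years.length : Int)])
  (bounds.zip bounds.tail).map
    (fun ab => (PySem.List.pyGetD years ab.1 0, PySem.List.pyGetD years (ab.2 - 1) 0))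
    -- years[b - 1]: IndexError when the list has no elements (excluded by Pre_)

def consolidate_team_periods_alt (team_years : List (String × List Int)) : List (String × List (Int × Int)) :=
  team_years.foldl
    (fun consolidated tv =>
      consolidated ++ [(tv.1, pvBper (PySem.List.sorted tv.2 (fun y => y) false))])
    []

-- ===== PRECONDITION & SPEC =====
-- Pre_ excludes inputs where some team's years list has no elements: there A (on years[0]) and B
-- (on years[b - 1]) both raise IndexError.
def Pre_consolidate_team_periods (team_years : List (String × List Int)) : Prop :=
  ∀ p ∈ team_years, p.2 ≠ []
instance (team_years : List (String × List Int)) : Decidable (Pre_consolidate_team_periods team_years) := by unfold Pre_consolidate_team_periods; infer_instance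
def pvWitness_consolidate_team_periods : (List (String × List Int)) :=
  [("CSK", [2010, 2008, 2009, 2015]), ("MI", [2013])]
def Spec_consolidate_team_periods (team_years : List (String × List Int)) (out : List (String × List (Int × Int))) : Prop := out = consolidate_team_periods_alt team_years
instance (team_years : List (String × List Int)) (out : List (String × List (Int × Int))) : Decidable (Spec_consolidate_team_periods team_years out) := by unfold Spec_consolidate_team_periods; infer_instance

-- ===== CLAIM (what is proved, stated in full; the proofs are below) =====
def Claim_equal_consolidate_team_periods : Prop := ∀ (team_years : List (String × List Int)), Dom_consolidate_team_periods team_years → Pre_consolidate_team_periods team_years → Spec_consolidate_team_periods team_years (consolidate_team_periods team_years)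

-- ===== LEMMAS AND PROOFS =====


-- the common recursive description of "merge a sorted list into maximal consecutive runs",
-- starting from an open period [s, e]
def pvRuns (s e : Int) : List Int → List (Int × Int)
  | [] => [(s, e)]
  | y :: t => if y = e + 1 then pvRuns s y t else (s, e) :: pvRuns y y t

-- A's state machine, folded over the tail, accumulates exactly pvRuns
theorem pv_fold_runs (t : List Int) : ∀ (acc : List (Int × Int)) (s e : Int),
    (List.foldl (fun (st : List (Int × Int) × Int × Int) (yi : Int) =>
        if yi = st.2.2 + 1 then (st.1, st.2.1, yi) else (st.1 ++ [(st.2.1, st.2.2)], yi, yi))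
      (acc, s, e) t).1
    ++ [((List.foldl (fun (st : List (Int × Int) × Int × Int) (yi : Int) =>
        if yi = st.2.2 + 1 then (st.1, st.2.1, yi) else (st.1 ++ [(st.2.1, st.2.2)], yi, yi))
      (acc, s, e) t).2.1,
        ((List.foldl (fun (st : List (Int × Int) × Int × Int) (yi : Int) =>
        if yi = st.2.2 + 1 then (st.1, st.2.1, yi) else (st.1 ++ [(st.2.1, st.2.2)], yi, yi))
      (acc, s, e) t).2.2))]
    = acc ++ pvRuns s e t := by
  induction t with
  | nil => intro acc s e; simp [pvRuns]
  | cons y t ih =>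
    intro acc s e
    by_cases h : y = e + 1
    · simp [List.foldl_cons, h, pvRuns, ih]
    · simp [List.foldl_cons, h, pvRuns, ih]

theorem pvA_eq_runs (y0 : Int) (t : List Int) : pvAper (y0 :: t) = pvRuns y0 y0 t := by
  simp only [pvAper, PySem.List.pyGetD_zero_cons]
  rw [PySem.List.foldl_pyRange_pyGetD' (y0 :: t) 0
        (fun (st : List (Int × Int) × Int × Int) (yi : Int) =>
          if yi = st.2.2 + 1 then (st.1, st.2.1, yi) else (st.1 ++ [(st.2.1, st.2.2)], yi, yi))
        ([], y0, y0) (by norm_num)]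
  simpa using pv_fold_runs t [] y0 y0

-- pyGetD index shift across a cons, for nonnegative indices
theorem pvGetD_succ (y : Int) (t : List Int) (i : Int) (hi : 0 ≤ i) :
    PySem.List.pyGetD (y :: t) (i + 1) 0 = PySem.List.pyGetD t i 0 := by
  obtain ⟨k, rfl⟩ := Int.eq_ofNat_of_zero_le hi
  have h1 : ((k : Int) + 1) = ((k + 1 : Nat) : Int) := by push_cast; ring
  rw [h1, PySem.List.pyGetD_natCast, PySem.List.pyGetD_natCast, List.getD_cons_succ]

theorem pvRange_shift (a b : Int) :
    PySem.List.pyRange (a + 1) (b + 1) 1 = (PySem.List.pyRange a b 1).map (fun i => i + 1) := by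
  rw [PySem.List.pyRange_one, PySem.List.pyRange_one, List.map_map]
  have hb : (b + 1 - (a + 1)) = b - a := by ring
  rw [hb]
  refine List.map_congr_left ?_
  intro k _
  simp; ring

-- every break index is at least 1 and below the length
theorem pvBreaks_bounds (ys : List Int) : ∀ i ∈ pvBreaks ys, 1 ≤ i ∧ i < (ys.length : Int) := by
  intro i hi
  have := List.mem_filter.mp hi
  exact PySem.List.mem_pyRange_one.mp this.1

-- peeling the head element off the break-position list
theorem pvBreaks_cons (y0 y1 : Int) (t : List Int) :
    pvBreaks (y0 :: y1 :: t)
      = (if y1 = y0 + 1 then [] else [1]) ++ (pvBreaks (y1 :: t)).map (fun i => i + 1) := by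
  unfold pvBreaks
  have hn1 : (1 : Int) ≤ ((y1 :: t).length : Int) := by
    have : 1 ≤ (y1 :: t).length := by simp
    exact_mod_cast this
  have hlen : (((y0 :: y1 :: t).length : Int)) = ((y1 :: t).length : Int) + 1 := by
    push_cast [List.length_cons]; ring
  rw [hlen, PySem.List.pyRange_one_cons (by omega), pvRange_shift 1 ((y1 :: t).length : Int),
      List.filter_cons, List.filter_map]
  have hg1 : PySem.List.pyGetD (y0 :: y1 :: t) 1 0 = y1 := by
    have := pvGetD_succ y0 (y1 :: t) 0 le_rfl
    rw [show (0 : Int) + 1 = 1 by ring] at this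
    rw [this, PySem.List.pyGetD_zero_cons]
  have hg0 : PySem.List.pyGetD (y0 :: y1 :: t) (1 - 1) 0 = y0 := by
    rw [show (1 : Int) - 1 = 0 by ring, PySem.List.pyGetD_zero_cons]
  have hcongr : ∀ i ∈ PySem.List.pyRange 1 ((y1 :: t).length : Int),
      ((fun i => decide (PySem.List.pyGetD (y0 :: y1 :: t) i 0 ≠ PySem.List.pyGetD (y0 :: y1 :: t) (i - 1) 0 + 1)) ∘ (fun i => i + 1)) i
        = (fun i => decide (PySem.List.pyGetD (y1 :: t) i 0 ≠ PySem.List.pyGetD (y1 :: t) (i - 1) 0 + 1)) i := by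
    intro i hi
    obtain ⟨hi1, hi2⟩ := PySem.List.mem_pyRange_one.mp hi
    have ha := pvGetD_succ y0 (y1 :: t) i (by omega)
    have hb := pvGetD_succ y0 (y1 :: t) (i - 1) (by omega)
    rw [show i - 1 + 1 = i by ring] at hb
    simp only [Function.comp_apply]
    rw [show i + 1 - 1 = i by ring, ha, hb]
  rw [List.filter_congr hcongr, hg1, hg0]
  by_cases h : y1 = y0 + 1
  · simp [h]
  · simp [h]

theorem pvRuns_start (l : List Int) : ∀ (e s s' : Int),
    pvRuns s' e l = (s', ((pvRuns s e l).headI).2) :: (pvRuns s e l).tail := by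
  induction l with
  | nil => intro e s s'; simp [pvRuns]
  | cons y l ih =>
    intro e s s'
    by_cases h : y = e + 1
    · simp only [pvRuns, if_pos h]
      exact ih y s s'
    · simp [pvRuns, h]

-- index shift of the endpoint-extraction map across a cons
theorem pv_g_shift (y : Int) (t1 : List Int) (a b2 : Int) (ha : 0 ≤ a) (hb : 1 ≤ b2) :
    (PySem.List.pyGetD (y :: t1) (a + 1) 0, PySem.List.pyGetD (y :: t1) (b2 + 1 - 1) 0)
      = (PySem.List.pyGetD t1 a 0, PySem.List.pyGetD t1 (b2 - 1) 0) := by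
  have h1 := pvGetD_succ y t1 a ha
  have h2 := pvGetD_succ y t1 (b2 - 1) (by omega)
  rw [show b2 - 1 + 1 = b2 by ring] at h2
  rw [show b2 + 1 - 1 = b2 by ring, h1, h2]

theorem pvB_eq_runs (y0 : Int) (t : List Int) : pvBper (y0 :: t) = pvRuns y0 y0 t := by
  induction t generalizing y0 with
  | nil =>
    simp [pvBper, pvBreaks, pvRuns, PySem.List.pyRange_one_eq_nil (le_refl (1 : Int)),
      PySem.List.pyGetD_zero_cons]
  | cons y1 t' ih =>
    have hn1 : (1 : Int) ≤ ((y1 :: t').length : Int) := by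
      have : 1 ≤ (y1 :: t').length := by simp
      exact_mod_cast this
    have hlen : (((y0 :: y1 :: t').length : Int)) = ((y1 :: t').length : Int) + 1 := by
      push_cast [List.length_cons]; ring
    -- every element of B' = breaks ++ [length] is at least 1
    have hBpos : ∀ x ∈ pvBreaks (y1 :: t') ++ [((y1 :: t').length : Int)], 1 ≤ x := by
      intro x hx
      rcases List.mem_append.mp hx with hx | hx
      · exact (pvBreaks_bounds _ x hx).1
      · simp at hx; omega
    obtain ⟨b, r, hbr⟩ : ∃ b r, pvBreaks (y1 :: t') ++ [((y1 :: t').length : Int)] = b :: r := by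
      cases h : pvBreaks (y1 :: t') with
      | nil => exact ⟨_, _, rfl⟩
      | cons a l => exact ⟨_, _, rfl⟩
    unfold pvBper
    rw [pvBreaks_cons, hlen]
    have hsplit : ((if y1 = y0 + 1 then [] else [1]) ++ (pvBreaks (y1 :: t')).map (fun i => i + 1))
        ++ [((y1 :: t').length : Int) + 1]
        = (if y1 = y0 + 1 then ([] : List Int) else [1])
          ++ (pvBreaks (y1 :: t') ++ [((y1 :: t').length : Int)]).map (fun i => i + 1) := by
      rw [List.map_append, List.append_assoc]; simp
    rw [hsplit, hbr]
    by_cases h : y1 = y0 + 1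
    · -- consecutive head: the first period of the tail extends back to y0
      rw [if_pos h]
      simp only [List.nil_append, List.map_cons, List.tail_cons, List.zip_cons_cons]
      -- zip ((b+1) :: map f r) (map f r) = map (shift) (zip (b :: r) r)
      have hz : ((b + 1) :: r.map (fun i => i + 1)).zip (r.map (fun i => i + 1))
          = ((b :: r).zip r).map (Prod.map (fun i => i + 1) (fun i => i + 1)) := by
        have hc : ((b + 1) :: r.map (fun i => i + 1)) = (b :: r).map (fun i => i + 1) := by simp
        rw [hc, List.zip_map]
      rw [hz, List.map_map]
      have hb1 : 1 ≤ b := hBpos b (by rw [hbr]; exact List.mem_cons_self)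
      have hfirst : ((PySem.List.pyGetD (y0 :: y1 :: t') 0 0, PySem.List.pyGetD (y0 :: y1 :: t') (b + 1 - 1) 0) : Int × Int)
          = (y0, PySem.List.pyGetD (y1 :: t') (b - 1) 0) := by
        have := pv_g_shift y0 (y1 :: t') 0 b le_rfl hb1
        rw [show (0 : Int) + 1 = 1 by ring] at this
        rw [PySem.List.pyGetD_zero_cons]
        have h2 := pvGetD_succ y0 (y1 :: t') (b - 1) (by omega)
        rw [show b - 1 + 1 = b by ring] at h2
        rw [show b + 1 - 1 = b by ring, h2]
      rw [hfirst]
      have hrest : ((b :: r).zip r).map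
          ((fun ab => (PySem.List.pyGetD (y0 :: y1 :: t') ab.1 0, PySem.List.pyGetD (y0 :: y1 :: t') (ab.2 - 1) 0))
            ∘ Prod.map (fun i => i + 1) (fun i => i + 1))
          = ((b :: r).zip r).map
            (fun ab => (PySem.List.pyGetD (y1 :: t') ab.1 0, PySem.List.pyGetD (y1 :: t') (ab.2 - 1) 0)) := by
        refine List.map_congr_left ?_
        intro ab hab
        obtain ⟨a1, a2⟩ := ab
        obtain ⟨ha1, ha2⟩ := List.of_mem_zip hab
        have hab1 : 1 ≤ a1 := hBpos a1 (by rw [hbr]; exact ha1)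
        have hab2 : 1 ≤ a2 := hBpos a2 (by rw [hbr]; exact List.mem_cons_of_mem b ha2)
        simp only [Function.comp_apply, Prod.map_apply]
        exact pv_g_shift y0 (y1 :: t') a1 a2 (by omega) hab2
      rw [hrest]
      -- relate to pvBper (y1 :: t') and the IH
      have htail : pvBper (y1 :: t')
          = (y1, PySem.List.pyGetD (y1 :: t') (b - 1) 0)
            :: ((b :: r).zip r).map
              (fun ab => (PySem.List.pyGetD (y1 :: t') ab.1 0, PySem.List.pyGetD (y1 :: t') (ab.2 - 1) 0)) := by
        unfold pvBper
        rw [hbr]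
        simp only [List.tail_cons, List.zip_cons_cons, List.map_cons, PySem.List.pyGetD_zero_cons]
      rw [ih y1] at htail
      have hx := pvRuns_start t' y1 y1 y0
      rw [htail] at hx
      simp only [List.headI, List.tail_cons] at hx
      show (y0, PySem.List.pyGetD (y1 :: t') (b - 1) 0)
          :: ((b :: r).zip r).map
            (fun ab => (PySem.List.pyGetD (y1 :: t') ab.1 0, PySem.List.pyGetD (y1 :: t') (ab.2 - 1) 0))
          = pvRuns y0 y0 (y1 :: t')
      rw [show pvRuns y0 y0 (y1 :: t') = pvRuns y0 y1 t' by rw [pvRuns, if_pos h], hx]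
    · -- broken head: a degenerate first period (y0, y0), then the tail's periods shifted
      rw [if_neg h]
      simp only [List.cons_append, List.nil_append, List.tail_cons, List.zip_cons_cons]
      have hz : ((1 : Int) :: (b :: r).map (fun i => i + 1)).zip ((b :: r).map (fun i => i + 1))
          = ((0 :: b :: r).zip (b :: r)).map (Prod.map (fun i => i + 1) (fun i => i + 1)) := by
        rw [show ((1 : Int) :: (b :: r).map (fun i => i + 1)) = ((0 : Int) :: b :: r).map (fun i => i + 1) by simp,
            List.zip_map]
      rw [hz, List.map_cons, List.map_map]
      have hfirst : ((PySem.List.pyGetD (y0 :: y1 :: t') 0 0, PySem.List.pyGetD (y0 :: y1 :: t') (1 - 1) 0) : Int × Int)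
          = (y0, y0) := by
        rw [show (1 : Int) - 1 = 0 by ring, PySem.List.pyGetD_zero_cons]
      rw [hfirst]
      have hrest : ((0 :: b :: r).zip (b :: r)).map
          ((fun ab => (PySem.List.pyGetD (y0 :: y1 :: t') ab.1 0, PySem.List.pyGetD (y0 :: y1 :: t') (ab.2 - 1) 0))
            ∘ Prod.map (fun i => i + 1) (fun i => i + 1))
          = ((0 :: b :: r).zip (b :: r)).map
            (fun ab => (PySem.List.pyGetD (y1 :: t') ab.1 0, PySem.List.pyGetD (y1 :: t') (ab.2 - 1) 0)) := by
        refine List.map_congr_left ?_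
        intro ab hab
        obtain ⟨a1, a2⟩ := ab
        obtain ⟨ha1, ha2⟩ := List.of_mem_zip hab
        have hab1 : 0 ≤ a1 := by
          rcases List.mem_cons.mp ha1 with h1 | h1
          · omega
          · have := hBpos a1 (by rw [hbr]; exact h1); omega
        have hab2 : 1 ≤ a2 := hBpos a2 (by rw [hbr]; exact ha2)
        simp only [Function.comp_apply, Prod.map_apply]
        exact pv_g_shift y0 (y1 :: t') a1 a2 hab1 hab2
      rw [hrest]
      have htail : pvBper (y1 :: t')
          = ((0 :: b :: r).zip (b :: r)).map
            (fun ab => (PySem.List.pyGetD (y1 :: t') ab.1 0, PySem.List.pyGetD (y1 :: t') (ab.2 - 1) 0)) := by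
        unfold pvBper
        rw [hbr]
        simp only [List.tail_cons]
      rw [← htail, ih y1, pvRuns, if_neg h]

-- ===== VERDICT (by name: the statement is the Claim_ definition above) =====
theorem consolidate_team_periods_spec : Claim_equal_consolidate_team_periods := by
  intro ty _ hpre
  unfold Spec_consolidate_team_periods consolidate_team_periods consolidate_team_periods_alt
  rw [PySem.List.foldl_append_singleton_eq_map, PySem.List.foldl_append_singleton_eq_map]
  simp only [List.nil_append]
  refine List.map_congr_left ?_
  intro p hp
  have hne : PySem.List.sorted p.2 (fun y => y) false ≠ [] := by
    have h2 := hpre p hp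
    intro h
    exact h2 (List.eq_nil_of_length_eq_zero (by
      have := congrArg List.length h
      simpa [PySem.List.length_sorted] using this))
  obtain ⟨y0, t, hs⟩ := List.exists_cons_of_ne_nil hne
  rw [hs, pvA_eq_runs, pvB_eq_runs]
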